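-- pv_equiv track=rewrite | github.com/hyeonjun/AlgorithmTest | ProGrammers/weekly/3rd_week.py | solution
-- ===== SOURCE A (Python) =====
-- def solution(game_board, table):
--     answer = 0
--     n = len(game_board)
--     # 1. game_board의 빈 공간 좌표와 table의 블록 좌표값을 BFS or DFS로 찾아내고 찾아낸 좌표값들을 정렬
--     def bfs(x, y, visited, board, check_point):
--         queue = [[x, y]]
--         direction = [(1,0), (-1,0), (0,1), (0,-1)]
--         space = [[x,y]]
--         visited[x][y] = True
--         while queue:
--             x, y = queue.pop(0)
--             for dx, dy in direction:
--                 nx, ny = x + dx, y + dy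
--                 if 0 > nx or nx >= n or 0 > ny or ny >= n:
--                     continue
--                 if not visited[nx][ny] and board[nx][ny] == check_point:
--                     visited[nx][ny] = True
--                     queue.append([nx, ny])
--                     space.append([nx, ny])
--         return sorted(space)
--
--     def standard(board): # 블록과 빈공간들을 모두 0,0에서 시작하도록 만든다
--         tmp = []
--         minx, miny = n, n
--         for i in board:
--             minx, miny = min(minx, i[0]), min(miny, i[1])
--         for x, y in board:
--             tmp.append([x-minx, y-miny])
--         return sorted(tmp)
--
--     def rotate(board):
--         tmp = []
--         for b in board:
--             tmp.append([b[1], n-1-b[0]])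
--         return standard(tmp)
--
--
--     # game_board = 0
--     # table = 1
--     game_board_empty, table_block = [], []
--     visited_game, visited_table = [[False for _ in range(n)] for _ in range(n)], [[False for _ in range(n)] for _ in range(n)]
--     for i in range(n):
--         for j in range(n):
--             if game_board[i][j] == 0 and visited_game[i][j] == False:
--                 game_board_empty.append(bfs(i,j,visited_game, game_board, 0))
--             if table[i][j] == 1 and visited_table[i][j] == False:
--                 table_block.append(bfs(i,j,visited_table, table, 1))
--
--     # 찾은 블록과 빈 공간들을 모두 0,0 기준으로 변환
--     table_b = []
--     for i in table_block:
--         table_b.append(standard(i))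
--
--     game_b = []
--     for i in game_board_empty:
--         game_b.append(standard(i))
--
--
--     for g in game_b:
--         if g in table_b:
--             answer += (len(g))
--             table_b.remove(g)
--         else:
--             flag = False
--             for t in table_b:
--                 import copy
--                 tmp = copy.copy(t)
--                 for _ in range(4): # 회전
--                     if g == tmp:
--                         answer += len(g)
--                         table_b.remove(t)
--                         flag=True
--                         break
--                     tmp = rotate(tmp)
--                 if flag:
--                     break
--     return answer
-- ===== SOURCE B (Python) =====
-- def solution(game_board, table):
--     n = len(game_board)
--
--     def components(board, value):
--         # scan rows by enumeration; visited cells kept in a set of coordinate tuples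
--         seen = set()
--         comps = []
--         for i, row in enumerate(board[:n]):
--             for j, v in enumerate(row[:n]):
--                 if v == value and (i, j) not in seen:
--                     seen.add((i, j))
--                     comp = [(i, j)]
--                     k = 0
--                     while k < len(comp):
--                         x, y = comp[k]
--                         k += 1
--                         for nx, ny in ((x + 1, y), (x - 1, y), (x, y + 1), (x, y - 1)):
--                             if 0 <= nx < n and 0 <= ny < n and (nx, ny) not in seen and board[nx][ny] == value:
--                                 seen.add((nx, ny))
--                                 comp.append((nx, ny))
--                     comps.append(comp)
--         return comps
--
--     def normalize(cs):
--         mx = min(p[0] for p in cs)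
--         my = min(p[1] for p in cs)
--         return sorted((x - mx, y - my) for x, y in cs)
--
--     def canonical(comp):
--         # rotation-invariant key: lexicographically least of the 4 rotations
--         shape = normalize(comp)
--         best = shape
--         for _ in range(3):
--             shape = normalize([(y, -x) for x, y in shape])
--             if shape < best:
--                 best = shape
--         return tuple(best)
--
--     counts = {}
--     for comp in components(table, 1):
--         k = canonical(comp)
--         counts[k] = counts.get(k, 0) + 1
--
--     answer = 0
--     for comp in components(game_board, 0):
--         k = canonical(comp)
--         if counts.get(k, 0) > 0:
--             counts[k] = counts.get(k, 0) - 1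
--             answer += len(comp)
--     return answer
-- ===== Notes on version B (the rewrite author's own statement) =====
-- stated objective: alternative
-- what changed: B replaces A's matching loop (for each empty space, rescan the remaining block list and compare against up to 4 freshly recomputed rotations, with list membership and list.remove) by hashing every block once under a rotation-invariant canonical form (lexicographically least of its 4 normalized rotations) into a dict of multiplicities, so each space is matched by one key computation and one dict lookup; component finding drops A's boolean visited matrix and queue.pop(0) BFS for a set of coordinate tuples and a growing-list traversal over enumerated rows.
import Mathlib
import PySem

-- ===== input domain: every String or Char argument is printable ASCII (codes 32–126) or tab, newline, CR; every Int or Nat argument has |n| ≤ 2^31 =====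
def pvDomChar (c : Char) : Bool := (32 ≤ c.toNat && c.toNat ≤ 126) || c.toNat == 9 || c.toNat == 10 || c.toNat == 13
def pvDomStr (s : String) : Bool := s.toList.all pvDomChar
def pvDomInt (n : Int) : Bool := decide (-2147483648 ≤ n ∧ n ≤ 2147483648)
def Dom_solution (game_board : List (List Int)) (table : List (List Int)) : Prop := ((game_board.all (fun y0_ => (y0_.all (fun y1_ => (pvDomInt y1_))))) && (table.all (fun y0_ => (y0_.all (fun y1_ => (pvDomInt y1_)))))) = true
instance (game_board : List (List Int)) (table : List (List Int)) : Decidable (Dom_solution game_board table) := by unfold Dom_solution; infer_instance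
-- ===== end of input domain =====

-- B replaces A's quadratic rotate-and-scan matching by a dict keyed on a rotation-invariant
-- canonical form of each component, and finds components with a set of visited coordinate
-- tuples over enumerated rows instead of A's boolean matrix and queue.pop(0) BFS.
-- Return-value equivalence only (A mutates nothing observable).

abbrev PvCell := Int × Int
abbrev PvShape := List PvCell

-- Python's sorted() on lists of [x,y] pairs: lexicographic on the pair (used by both programs)
def pvSortCells (s : PvShape) : PvShape := PySem.List.sorted s (fun p => toLex p) false

-- ===== PORT A =====
def pvGetB (b : List (List Int)) (x y : Int) : Int :=
  PySem.List.pyGetD (PySem.List.pyGetD b x []) y 0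

def pvGetV (v : List (List Bool)) (x y : Int) : Bool :=
  PySem.List.pyGetD (PySem.List.pyGetD v x []) y false

def pvSetV (v : List (List Bool)) (x y : Int) : List (List Bool) :=
  PySem.List.pySetD v x (PySem.List.pySetD (PySem.List.pyGetD v x []) y true)

def pvDirsA : List (Int × Int) := [(1,0), (-1,0), (0,1), (0,-1)]

-- one direction probe of A's bfs inner loop; state = (queue, space, visited)
def pvBfsStepA (n : Int) (board : List (List Int)) (cp : Int) (x y : Int)
    (st : PvShape × PvShape × List (List Bool)) (d : Int × Int) :
    PvShape × PvShape × List (List Bool) :=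
  let nx := x + d.1
  let ny := y + d.2
  if 0 > nx ∨ nx ≥ n ∨ 0 > ny ∨ ny ≥ n then st
  else if ¬ pvGetV st.2.2 nx ny ∧ pvGetB board nx ny = cp then
    (st.1 ++ [(nx, ny)], st.2.1 ++ [(nx, ny)], pvSetV st.2.2 nx ny)
  else st

-- A's 'while queue:' loop (fuel bounds the pops; n*n+1 always suffices: every pop was an enqueue
-- and every enqueue marks an unvisited cell)
def pvBfsLoopA (n : Int) (board : List (List Int)) (cp : Int) :
    Nat → PvShape → PvShape → List (List Bool) → PvShape × List (List Bool)
  | 0, _, space, visited => (space, visited)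
  | _ + 1, [], space, visited => (space, visited)
  | fuel + 1, (x, y) :: qrest, space, visited =>
      let st := pvDirsA.foldl (pvBfsStepA n board cp x y) (qrest, space, visited)
      pvBfsLoopA n board cp fuel st.1 st.2.1 st.2.2

def pvBfsA (n : Int) (fuel : Nat) (board : List (List Int)) (cp : Int) (x y : Int)
    (visited : List (List Bool)) : PvShape × List (List Bool) :=
  let visited := pvSetV visited x y
  let r := pvBfsLoopA n board cp fuel [(x, y)] [(x, y)] visited
  (pvSortCells r.1, r.2)

-- one cell of A's scan 'if board[i][j] == cp and not visited[i][j]: …append(bfs(i,j,…))'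
def pvScanStepA (n : Int) (fuel : Nat) (board : List (List Int)) (cp : Int)
    (st : List PvShape × List (List Bool)) (i j : Int) : List PvShape × List (List Bool) :=
  if pvGetB board i j = cp ∧ ¬ pvGetV st.2 i j then
    let r := pvBfsA n fuel board cp i j st.2
    (st.1 ++ [r.1], r.2)
  else st

def pvStdA (n : Int) (board : PvShape) : PvShape :=
  let m := board.foldl (fun (mm : Int × Int) c => (min mm.1 c.1, min mm.2 c.2)) (n, n)
  pvSortCells (board.map (fun c => (c.1 - m.1, c.2 - m.2)))

def pvRotateA (n : Int) (b : PvShape) : PvShape :=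
  pvStdA n (b.map (fun c => (c.2, n - 1 - c.1)))

-- A's 'for _ in range(4): if g == tmp: …; tmp = rotate(tmp)'
def pvTryRotA (n : Int) (g : PvShape) : PvShape → Nat → Bool
  | _, 0 => false
  | tmp, k + 1 => if g = tmp then true else pvTryRotA n g (pvRotateA n tmp) k

-- A's matching loop body; state = (answer, table_b)
def pvMatchStepA (n : Int) (st : Int × List PvShape) (g : PvShape) : Int × List PvShape :=
  if g ∈ st.2 then (st.1 + (g.length : Int), st.2.erase g)
  else
    match st.2.find? (fun t => pvTryRotA n g t 4) with
    | some t => (st.1 + (g.length : Int), st.2.erase t)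
    | none => st

def solution (game_board : List (List Int)) (table : List (List Int)) : Int :=
  let nN := game_board.length
  let n : Int := (nN : Int)
  let fuel := nN * nN + 1
  let vis0 := List.replicate nN (List.replicate nN false)
  let scan :=
    (PySem.List.pyRange 0 n 1).foldl (fun st i =>
      (PySem.List.pyRange 0 n 1).foldl (fun (st : (List PvShape × List (List Bool)) × (List PvShape × List (List Bool))) j =>
        (pvScanStepA n fuel game_board 0 st.1 i j, pvScanStepA n fuel table 1 st.2 i j)) st)
      (([], vis0), ([], vis0))
  let table_b := scan.2.1.map (pvStdA n)
  let game_b := scan.1.1.map (pvStdA n)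
  (game_b.foldl (pvMatchStepA n) (0, table_b)).1

-- ===== PORT B =====
abbrev PvSeen := List PvCell

def pvRotB (p : PvCell) : PvCell := (p.2, -p.1)

-- min() of the coordinates of a nonempty cell list, then shift to (0,0) and sort
def pvNormB (s : PvShape) : PvShape :=
  match s with
  | [] => []
  | c :: r =>
    let mx := r.foldl (fun m p => min m p.1) c.1
    let my := r.foldl (fun m p => min m p.2) c.2
    pvSortCells (s.map (fun p => (p.1 - mx, p.2 - my)))

-- Python's '<' on lists of [x,y] pairs (lexicographic, shorter prefix first)
def pvCellLt (p q : PvCell) : Bool := p.1 < q.1 || (p.1 == q.1 && p.2 < q.2)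

def pvShapeLt : PvShape → PvShape → Bool
  | [], [] => false
  | [], _ :: _ => true
  | _ :: _, [] => false
  | p :: ps, q :: qs =>
    if pvCellLt p q then true else if pvCellLt q p then false else pvShapeLt ps qs

-- B's 'for _ in range(3): shape = normalize(rotated); if shape < best: best = shape'
def pvCanonLoopB : Nat → PvShape → PvShape → PvShape
  | 0, _, best => best
  | k + 1, shape, best =>
    let sh := pvNormB (shape.map pvRotB)
    pvCanonLoopB k sh (if pvShapeLt sh best then sh else best)

def pvCanonB (comp : PvShape) : PvShape :=
  let s0 := pvNormB comp
  pvCanonLoopB 3 s0 s0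

-- the 4 neighbour tuples of B's inner 'for nx, ny in (…)'
def pvNbrs (c : PvCell) : List PvCell :=
  [(c.1 + 1, c.2), (c.1 - 1, c.2), (c.1, c.2 + 1), (c.1, c.2 - 1)]

-- B's neighbour test: bounds, then the seen set, then the board value; seen grows by cons
def pvVisit (n : Int) (board : List (List Int)) (v : Int)
    (st : PvShape × PvSeen) (c : PvCell) : PvShape × PvSeen :=
  if 0 ≤ c.1 ∧ c.1 < n ∧ 0 ≤ c.2 ∧ c.2 < n ∧ ¬ st.2.contains c = true ∧
      PySem.List.pyGetD (PySem.List.pyGetD board c.1 []) c.2 0 = v then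
    (st.1 ++ [c], c :: st.2)
  else st

-- B's 'while k < len(comp):' — the worklist is the component itself, read through an index
def pvGrow (n : Int) (board : List (List Int)) (v : Int) :
    Nat → PvShape → Nat → PvSeen → PvShape × PvSeen
  | 0, comp, _, seen => (comp, seen)
  | fuel + 1, comp, k, seen =>
    match comp.drop k with
    | [] => (comp, seen)
    | c :: _ =>
      let st := (pvNbrs c).foldl (pvVisit n board v) (comp, seen)
      pvGrow n board v fuel st.1 (k + 1) st.2

-- one enumerated cell (j, value) of B's row scan
def pvScanCell (n : Int) (fuel : Nat) (board : List (List Int)) (v : Int) (i : Int)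
    (st : List PvShape × PvSeen) (jv : Int × Int) : List PvShape × PvSeen :=
  if jv.2 = v ∧ ¬ st.2.contains (i, jv.1) = true then
    let r := pvGrow n board v fuel [(i, jv.1)] 0 ((i, jv.1) :: st.2)
    (st.1 ++ [r.1], r.2)
  else st

def pvComponentsB (nN : Nat) (board : List (List Int)) (v : Int) : List PvShape :=
  ((PySem.List.enumerate (board.take nN) 0).foldl (fun st ir =>
      (PySem.List.enumerate (ir.2.take nN) 0).foldl
        (pvScanCell (nN : Int) (nN * nN + 1) board v ir.1) st)
    ([], [])).1

def solution_alt (game_board : List (List Int)) (table : List (List Int)) : Int :=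
  let nN := game_board.length
  let counts := (pvComponentsB nN table 1).foldl
    (fun (d : PySem.Dict PvShape Int) c =>
      d.insert (pvCanonB c) (d.getD (pvCanonB c) 0 + 1)) PySem.Dict.empty
  ((pvComponentsB nN game_board 0).foldl
    (fun (st : Int × PySem.Dict PvShape Int) c =>
      if st.2.getD (pvCanonB c) 0 > 0 then
        (st.1 + (c.length : Int), st.2.insert (pvCanonB c) (st.2.getD (pvCanonB c) 0 - 1))
      else st) (0, counts)).1

-- ===== PRECONDITION & SPEC =====
-- Pre_ excludes exactly the inputs on which A raises IndexError: a row of game_board, or the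
-- table (or one of its first n rows), shorter than n = len(game_board).
def Pre_solution (game_board : List (List Int)) (table : List (List Int)) : Prop :=
  (∀ row ∈ game_board, game_board.length ≤ row.length) ∧
  game_board.length ≤ table.length ∧
  (∀ row ∈ table.take game_board.length, game_board.length ≤ row.length)
instance (game_board : List (List Int)) (table : List (List Int)) : Decidable (Pre_solution game_board table) := by unfold Pre_solution; infer_instance

def pvWitness_solution : List (List Int) × List (List Int) := ([[0, 1], [1, 1]], [[1, 0], [0, 0]])

def Spec_solution (game_board : List (List Int)) (table : List (List Int)) (out : Int) : Prop := out = solution_alt game_board table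
instance (game_board : List (List Int)) (table : List (List Int)) (out : Int) : Decidable (Spec_solution game_board table out) := by unfold Spec_solution; infer_instance

-- ===== CLAIM (what is proved, stated in full; the proofs are below) =====
def Claim_equal_solution : Prop := ∀ (game_board : List (List Int)) (table : List (List Int)), Dom_solution game_board table → Pre_solution game_board table → Spec_solution game_board table (solution game_board table)

-- ===== LEMMAS AND PROOFS =====
-- ---------- order bridge: pvShapeLt is Python's list comparison = lexicographic order ----------
def pvKey (s : PvShape) : List (Lex (Int × Int)) := s.map (fun p => toLex p)

lemma pvKey_inj : Function.Injective pvKey := List.map_injective_iff.mpr toLex.injective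

lemma pvCellLt_iff (p q : PvCell) : pvCellLt p q = true ↔ toLex p < toLex q := by
  simp only [pvCellLt, Prod.Lex.lt_iff, ofLex_toLex, Bool.or_eq_true, Bool.and_eq_true,
    decide_eq_true_eq, beq_iff_eq]

lemma pvCellLt_ff (p q : PvCell) (h1 : pvCellLt p q = false) (h2 : pvCellLt q p = false) : p = q := by
  simp only [pvCellLt, Bool.or_eq_false_iff, Bool.and_eq_false_iff, decide_eq_false_iff_not,
    beq_eq_false_iff_ne, ne_eq] at h1 h2
  have : p.1 = q.1 := by omega
  have : p.2 = q.2 := by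
    rcases h1 with ⟨h1a, h1b⟩; rcases h2 with ⟨h2a, h2b⟩
    rcases h1b with h | h <;> rcases h2b with h' | h' <;> omega
  exact Prod.ext ‹p.1 = q.1› ‹p.2 = q.2›

lemma pvShapeLt_iff : ∀ a b : PvShape, pvShapeLt a b = true ↔ pvKey a < pvKey b := by
  intro a
  induction a with
  | nil =>
    intro b; cases b with
    | nil =>
      exact iff_of_false (by simp [pvShapeLt]) (fun h => nomatch h)
    | cons q qs =>
      exact iff_of_true (by simp [pvShapeLt]) List.Lex.nil
  | cons p ps ih =>
    intro b; cases b with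
    | nil =>
      exact iff_of_false (by simp [pvShapeLt]) (fun h => nomatch h)
    | cons q qs =>
      show (if pvCellLt p q then true else if pvCellLt q p then false else pvShapeLt ps qs) = true ↔
        List.Lex (· < ·) (toLex p :: pvKey ps) (toLex q :: pvKey qs)
      by_cases h1 : pvCellLt p q = true
      · rw [if_pos h1]
        exact iff_of_true rfl (List.Lex.rel ((pvCellLt_iff p q).mp h1))
      · have h1' : ¬ toLex p < toLex q := fun hc => h1 ((pvCellLt_iff p q).mpr hc)
        rw [if_neg h1]
        by_cases h2 : pvCellLt q p = true
        · have h2' : toLex q < toLex p := (pvCellLt_iff q p).mp h2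
          rw [if_pos h2]
          refine iff_of_false (by simp) ?_
          intro hlex
          cases hlex with
          | rel hr => exact h1' hr
          | cons ht => exact lt_irrefl _ h2'
        · have hpq : p = q := pvCellLt_ff p q (by simpa using h1) (by simpa using h2)
          subst hpq
          rw [if_neg h2, ih qs]
          constructor
          · intro h; exact List.Lex.cons h
          · intro hlex
            cases hlex with
            | rel hr => exact absurd hr (lt_irrefl _)
            | cons ht => exact ht

-- min helpers for the coordinate minima in pvStdA / pvNormB
def pvIsMin (m : Int) (l : List Int) : Prop := m ∈ l ∧ ∀ x ∈ l, m ≤ x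

lemma pvIsMin_unique {m m' : Int} {l : List Int} (h : pvIsMin m l) (h' : pvIsMin m' l) : m = m' :=
  le_antisymm (h.2 m' h'.1) (h'.2 m h.1)

lemma pvFoldlMin_spec : ∀ (l : List Int) (a : Int), pvIsMin (l.foldl min a) (a :: l) := by
  intro l
  induction l with
  | nil => intro a; exact ⟨List.mem_cons.mpr (Or.inl rfl), by simp⟩
  | cons x l ih =>
    intro a
    simp only [List.foldl_cons]
    obtain ⟨hmem, hle⟩ := ih (min a x)
    constructor
    · rcases List.mem_cons.mp hmem with he | hl
      · rcases min_choice a x with hm | hm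
        · exact List.mem_cons.mpr (Or.inl (he.trans hm))
        · exact List.mem_cons.mpr (Or.inr (List.mem_cons.mpr (Or.inl (he.trans hm))))
      · exact List.mem_cons.mpr (Or.inr (List.mem_cons.mpr (Or.inr hl)))
    · intro y hy
      rcases List.mem_cons.mp hy with rfl | hy2
      · exact le_trans (hle _ (List.mem_cons.mpr (Or.inl rfl))) (min_le_left _ _)
      rcases List.mem_cons.mp hy2 with rfl | hy3
      · exact le_trans (hle _ (List.mem_cons.mpr (Or.inl rfl))) (min_le_right _ _)
      · exact hle y (List.mem_cons_of_mem _ hy3)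

lemma pvMinFst_spec (c : PvCell) (r : List PvCell) :
    pvIsMin (r.foldl (fun m p => min m p.1) c.1) ((c :: r).map (·.1)) := by
  have : r.foldl (fun m p => min m p.1) c.1 = (r.map (·.1)).foldl min c.1 := by
    rw [List.foldl_map]
  rw [this]
  simpa using pvFoldlMin_spec (r.map (·.1)) c.1

lemma pvMinSnd_spec (c : PvCell) (r : List PvCell) :
    pvIsMin (r.foldl (fun m p => min m p.2) c.2) ((c :: r).map (·.2)) := by
  have : r.foldl (fun m p => min m p.2) c.2 = (r.map (·.2)).foldl min c.2 := by
    rw [List.foldl_map]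
  rw [this]
  simpa using pvFoldlMin_spec (r.map (·.2)) c.2

-- ---------- pvSortCells facts ----------
lemma pvSortCells_perm (s : PvShape) : (pvSortCells s).Perm s :=
  PySem.List.sorted_perm s _ false

lemma pvSortCells_eq_of_perm {s t : PvShape} (h : s.Perm t) : pvSortCells s = pvSortCells t :=
  PySem.List.sorted_eq_sorted_of_perm s t _ toLex.injective h

lemma pvSortCells_idem (s : PvShape) : pvSortCells (pvSortCells s) = pvSortCells s :=
  PySem.List.sorted_sorted s _

lemma pvSortCells_length (s : PvShape) : (pvSortCells s).length = s.length :=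
  (pvSortCells_perm s).length_eq

-- ---------- pvNormB engine ----------
lemma pvNormB_spec (s : PvShape) (mx my : Int) (hx : pvIsMin mx (s.map (·.1)))
    (hy : pvIsMin my (s.map (·.2))) :
    pvNormB s = pvSortCells (s.map (fun p => (p.1 - mx, p.2 - my))) := by
  cases s with
  | nil => exact absurd hx.1 (by simp)
  | cons c r =>
    show pvSortCells _ = _
    rw [pvIsMin_unique (pvMinFst_spec c r) hx, pvIsMin_unique (pvMinSnd_spec c r) hy]

lemma pvNormB_length (s : PvShape) : (pvNormB s).length = s.length := by
  cases s with
  | nil => rfl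
  | cons c r => show (pvSortCells _).length = _; rw [pvSortCells_length, List.length_map]

lemma pvNormB_ne_nil {s : PvShape} (h : s ≠ []) : pvNormB s ≠ [] := by
  intro hc
  have := pvNormB_length s
  rw [hc] at this
  exact h (List.eq_nil_of_length_eq_zero this.symm)

lemma pvIsMin_of_perm {m : Int} {l l' : List Int} (hp : l.Perm l') (h : pvIsMin m l) :
    pvIsMin m l' := ⟨hp.mem_iff.mp h.1, fun x hx => h.2 x (hp.mem_iff.mpr hx)⟩

lemma pvNormB_perm {s t : PvShape} (h : s.Perm t) : pvNormB s = pvNormB t := by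
  cases s with
  | nil => rw [← h.nil_eq]
  | cons c r =>
    have hst : (c :: r) ≠ [] := by simp
    have ht : t ≠ [] := by intro hc; rw [hc] at h; exact hst h.eq_nil
    cases t with
    | nil => exact absurd rfl ht
    | cons c' r' =>
      have hx := pvMinFst_spec c r
      have hy := pvMinSnd_spec c r
      rw [pvNormB_spec (c :: r) _ _ hx hy,
        pvNormB_spec (c' :: r') _ _ (pvIsMin_of_perm (h.map (·.1)) hx)
          (pvIsMin_of_perm (h.map (·.2)) hy)]
      exact pvSortCells_eq_of_perm (h.map _)

lemma pvNormB_translate (s : PvShape) (a b : Int) :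
    pvNormB (s.map (fun p => (p.1 + a, p.2 + b))) = pvNormB s := by
  cases s with
  | nil => rfl
  | cons c r =>
    have hx := pvMinFst_spec c r
    have hy := pvMinSnd_spec c r
    have hx' : pvIsMin (r.foldl (fun m p => min m p.1) c.1 + a)
        (((c :: r).map (fun p => (p.1 + a, p.2 + b))).map (·.1)) := by
      constructor
      · have : ((c :: r).map (fun p => (p.1 + a, p.2 + b))).map (·.1)
            = ((c :: r).map (·.1)).map (· + a) := by simp [List.map_map]
        rw [this]
        exact List.mem_map.mpr ⟨_, hx.1, rfl⟩
      · intro x hx2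
        rcases List.mem_map.mp hx2 with ⟨p, hp, rfl⟩
        rcases List.mem_map.mp hp with ⟨q, hq, rfl⟩
        have := hx.2 q.1 (List.mem_map.mpr ⟨q, hq, rfl⟩)
        simpa using by omega
    have hy' : pvIsMin (r.foldl (fun m p => min m p.2) c.2 + b)
        (((c :: r).map (fun p => (p.1 + a, p.2 + b))).map (·.2)) := by
      constructor
      · have : ((c :: r).map (fun p => (p.1 + a, p.2 + b))).map (·.2)
            = ((c :: r).map (·.2)).map (· + b) := by simp [List.map_map]
        rw [this]
        exact List.mem_map.mpr ⟨_, hy.1, rfl⟩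
      · intro x hx2
        rcases List.mem_map.mp hx2 with ⟨p, hp, rfl⟩
        rcases List.mem_map.mp hp with ⟨q, hq, rfl⟩
        have := hy.2 q.2 (List.mem_map.mpr ⟨q, hq, rfl⟩)
        simpa using by omega
    rw [pvNormB_spec _ _ _ hx' hy', pvNormB_spec (c :: r) _ _ hx hy]
    congr 1
    rw [List.map_map]
    apply List.map_congr_left
    intro p _
    show (p.1 + a - _, p.2 + b - _) = _
    simp only [Prod.mk.injEq]
    omega

-- ---------- rotation engine ----------
def pvR (s : PvShape) : PvShape := pvNormB (s.map pvRotB)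

def pvStdP (s : PvShape) : Prop := s ≠ [] ∧ pvNormB s = s

def pvRk : Nat → PvShape → PvShape
  | 0, x => x
  | k + 1, x => pvR (pvRk k x)

def pvOrb (x : PvShape) : List PvShape := [x, pvR x, pvR (pvR x), pvR (pvR (pvR x))]

def pvM (b s : PvShape) : PvShape := if pvShapeLt s b then s else b

def pvCanonN (x : PvShape) : PvShape := pvCanonLoopB 3 x x

lemma pvCanonB_eq (c : PvShape) : pvCanonB c = pvCanonN (pvNormB c) := rfl

lemma pvCanonN_eq (x : PvShape) :
    pvCanonN x = pvM (pvM (pvM x (pvR x)) (pvR (pvR x))) (pvR (pvR (pvR x))) := rfl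

lemma pvMap_ne_nil {s : PvShape} (f : PvCell → PvCell) (h : s ≠ []) : s.map f ≠ [] := by
  simpa using h

lemma pvNormB_zero_min {s : PvShape} (h : s ≠ []) :
    pvIsMin 0 ((pvNormB s).map (·.1)) ∧ pvIsMin 0 ((pvNormB s).map (·.2)) := by
  cases s with
  | nil => exact absurd rfl h
  | cons c r =>
    have hx := pvMinFst_spec c r
    have hy := pvMinSnd_spec c r
    rw [pvNormB_spec (c :: r) _ _ hx hy]
    constructor
    · apply pvIsMin_of_perm ((pvSortCells_perm _).map _).symm
      constructor
      · rcases List.mem_map.mp hx.1 with ⟨q, hq, hq1⟩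
        refine List.mem_map.mpr ⟨_, List.mem_map.mpr ⟨q, hq, rfl⟩, ?_⟩
        dsimp; omega
      · intro x hx2
        rcases List.mem_map.mp hx2 with ⟨p, hp, rfl⟩
        rcases List.mem_map.mp hp with ⟨q, hq, rfl⟩
        have := hx.2 q.1 (List.mem_map.mpr ⟨q, hq, rfl⟩)
        dsimp; omega
    · apply pvIsMin_of_perm ((pvSortCells_perm _).map _).symm
      constructor
      · rcases List.mem_map.mp hy.1 with ⟨q, hq, hq1⟩
        refine List.mem_map.mpr ⟨_, List.mem_map.mpr ⟨q, hq, rfl⟩, ?_⟩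
        dsimp; omega
      · intro x hx2
        rcases List.mem_map.mp hx2 with ⟨p, hp, rfl⟩
        rcases List.mem_map.mp hp with ⟨q, hq, rfl⟩
        have := hy.2 q.2 (List.mem_map.mpr ⟨q, hq, rfl⟩)
        dsimp; omega

lemma pvNormB_idem {s : PvShape} (h : s ≠ []) : pvNormB (pvNormB s) = pvNormB s := by
  obtain ⟨hx0, hy0⟩ := pvNormB_zero_min h
  rw [pvNormB_spec (pvNormB s) 0 0 hx0 hy0]
  have : (pvNormB s).map (fun p : PvCell => (p.1 - 0, p.2 - 0)) = pvNormB s := by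
    have : (fun p : PvCell => (p.1 - 0, p.2 - 0)) = id := by
      funext p; simp
    rw [this, List.map_id]
  rw [this]
  cases s with
  | nil => exact absurd rfl h
  | cons c r => exact pvSortCells_idem _

lemma pvStd_norm {s : PvShape} (h : s ≠ []) : pvStdP (pvNormB s) :=
  ⟨pvNormB_ne_nil h, pvNormB_idem h⟩

lemma pvStd_R {s : PvShape} (h : pvStdP s) : pvStdP (pvR s) :=
  pvStd_norm (pvMap_ne_nil pvRotB h.1)

lemma pvR_of_norm {s : PvShape} (h : s ≠ []) : pvR (pvNormB s) = pvR s := by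
  cases s with
  | nil => exact absurd rfl h
  | cons c r =>
    have hx := pvMinFst_spec c r
    have hy := pvMinSnd_spec c r
    show pvNormB ((pvNormB (c :: r)).map pvRotB) = pvNormB ((c :: r).map pvRotB)
    rw [pvNormB_spec (c :: r) _ _ hx hy]
    rw [pvNormB_perm (((pvSortCells_perm _).map pvRotB))]
    rw [List.map_map]
    have : (c :: r).map (pvRotB ∘ fun p => (p.1 - r.foldl (fun m p => min m p.1) c.1,
        p.2 - r.foldl (fun m p => min m p.2) c.2))
        = ((c :: r).map pvRotB).map (fun p =>
            (p.1 + -(r.foldl (fun m p => min m p.2) c.2), p.2 + r.foldl (fun m p => min m p.1) c.1)) := by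
      rw [List.map_map]
      apply List.map_congr_left
      intro p _
      simp only [Function.comp, pvRotB, Prod.mk.injEq]
      omega
    rw [this, pvNormB_translate]

lemma pvR_norm_map (x : PvShape) (f g : PvCell → PvCell) (hx : x ≠ [])
    (h : ∀ p, pvRotB (f p) = g p) : pvR (pvNormB (x.map f)) = pvNormB (x.map g) := by
  rw [pvR_of_norm (pvMap_ne_nil f hx)]
  show pvNormB ((x.map f).map pvRotB) = _
  rw [List.map_map]
  congr 1
  exact List.map_congr_left (fun p _ => h p)

lemma pvR4 {x : PvShape} (h : pvStdP x) : pvRk 4 x = x := by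
  have hne := h.1
  have e1' : pvR x = pvNormB (x.map (fun p : PvCell => (p.2, -p.1))) := rfl
  have e2 : pvR (pvR x) = pvNormB (x.map (fun p : PvCell => (-p.1, -p.2))) := by
    rw [e1', pvR_norm_map x _ (fun p : PvCell => (-p.1, -p.2)) hne (fun p => rfl)]
  have e3 : pvR (pvR (pvR x)) = pvNormB (x.map (fun p : PvCell => (-p.2, p.1))) := by
    rw [e2, pvR_norm_map x _ (fun p : PvCell => (-p.2, p.1)) hne (fun p => by simp [pvRotB])]
  have e4 : pvR (pvR (pvR (pvR x))) = pvNormB (x.map (fun p : PvCell => (p.1, p.2))) := by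
    rw [e3, pvR_norm_map x _ (fun p : PvCell => (p.1, p.2)) hne (fun p => by simp [pvRotB])]
  show pvR (pvR (pvR (pvR x))) = x
  rw [e4]
  have : x.map (fun p : PvCell => (p.1, p.2)) = x := by simp
  rw [this, h.2]

lemma pvRk_add (m k : Nat) (x : PvShape) : pvRk (m + k) x = pvRk m (pvRk k x) := by
  induction m with
  | zero => simp [pvRk]
  | succ m ih => rw [Nat.succ_add]; show pvR _ = pvR _; rw [ih]

lemma pvRk_std {x : PvShape} (h : pvStdP x) (k : Nat) : pvStdP (pvRk k x) := by
  induction k with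
  | zero => exact h
  | succ k ih => exact pvStd_R ih

lemma pvRk4_add {x : PvShape} (h : pvStdP x) (k : Nat) : pvRk (k + 4) x = pvRk k x := by
  rw [pvRk_add k 4 x, pvR4 h]

lemma pvRk_mod4 {x : PvShape} (h : pvStdP x) (m : Nat) : pvRk m x = pvRk (m % 4) x := by
  induction m using Nat.strong_induction_on with
  | _ m ih =>
    by_cases hm : m < 4
    · rw [Nat.mod_eq_of_lt hm]
    · have h4 : m = (m - 4) + 4 := by omega
      rw [h4, pvRk4_add h, ih (m - 4) (by omega)]
      congr 1
      omega

lemma mem_pvOrb_iff {y x : PvShape} : y ∈ pvOrb x ↔ ∃ a, a < 4 ∧ y = pvRk a x := by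
  constructor
  · intro hy
    rcases hy with _ | ⟨_, hy⟩
    · exact ⟨0, by omega, rfl⟩
    rcases hy with _ | ⟨_, hy⟩
    · exact ⟨1, by omega, rfl⟩
    rcases hy with _ | ⟨_, hy⟩
    · exact ⟨2, by omega, rfl⟩
    rcases hy with _ | ⟨_, hy⟩
    · exact ⟨3, by omega, rfl⟩
    · exact nomatch hy
  · rintro ⟨a, ha, rfl⟩
    interval_cases a
    · exact List.mem_cons.mpr (Or.inl rfl)
    · exact List.mem_cons.mpr (Or.inr (List.mem_cons.mpr (Or.inl rfl)))
    · exact List.mem_cons.mpr (Or.inr (List.mem_cons.mpr (Or.inr (List.mem_cons.mpr (Or.inl rfl)))))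
    · exact List.mem_cons.mpr (Or.inr (List.mem_cons.mpr (Or.inr (List.mem_cons.mpr (Or.inr
        (List.mem_cons.mpr (Or.inl rfl)))))))

lemma pvOrb_subset {t g : PvShape} (h : pvStdP t) (hg : g ∈ pvOrb t) :
    ∀ y ∈ pvOrb g, y ∈ pvOrb t := by
  rcases mem_pvOrb_iff.mp hg with ⟨a, ha, rfl⟩
  intro y hy
  rcases mem_pvOrb_iff.mp hy with ⟨j, hj, rfl⟩
  rw [← pvRk_add j a t, pvRk_mod4 h]
  exact mem_pvOrb_iff.mpr ⟨(j + a) % 4, by omega, rfl⟩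

lemma pvOrb_mem_symm {t g : PvShape} (h : pvStdP t) (hg : g ∈ pvOrb t) : t ∈ pvOrb g := by
  rcases mem_pvOrb_iff.mp hg with ⟨a, ha, rfl⟩
  rcases Nat.eq_zero_or_pos a with rfl | hpos
  · exact mem_pvOrb_iff.mpr ⟨0, by omega, rfl⟩
  · have ht : t = pvRk (4 - a) (pvRk a t) := by
      rw [← pvRk_add (4 - a) a t, show 4 - a + a = 4 by omega, pvR4 h]
    exact mem_pvOrb_iff.mpr ⟨4 - a, by omega, ht⟩

-- canonical form = least element of the orbit, in the key world
lemma key_pvM (b s : PvShape) : pvKey (pvM b s) = min (pvKey b) (pvKey s) := by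
  unfold pvM
  by_cases h : pvShapeLt s b = true
  · rw [if_pos h, min_eq_right (le_of_lt ((pvShapeLt_iff s b).mp h))]
  · have : ¬ pvKey s < pvKey b := fun hc => h ((pvShapeLt_iff s b).mpr hc)
    rw [if_neg h, min_eq_left (le_of_not_gt this)]

lemma pvCanonN_mem (x : PvShape) : pvCanonN x ∈ pvOrb x := by
  rw [pvCanonN_eq]
  unfold pvM
  split_ifs <;> simp [pvOrb]

lemma pvCanonN_min (x : PvShape) : ∀ y ∈ pvOrb x, pvKey (pvCanonN x) ≤ pvKey y := by
  intro y hy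
  rw [pvCanonN_eq, key_pvM, key_pvM, key_pvM]
  rcases mem_pvOrb_iff.mp hy with ⟨a, ha, rfl⟩
  interval_cases a <;> simp [pvRk]

lemma pvCanon_eq_of_orb {t g : PvShape} (h : pvStdP t) (hg : g ∈ pvOrb t) :
    pvCanonN g = pvCanonN t := by
  have hstdg : pvStdP g := by
    rcases mem_pvOrb_iff.mp hg with ⟨a, _, rfl⟩
    exact pvRk_std h a
  have hsub1 : ∀ y ∈ pvOrb g, y ∈ pvOrb t := pvOrb_subset h hg
  have hsub2 : ∀ y ∈ pvOrb t, y ∈ pvOrb g := pvOrb_subset hstdg (pvOrb_mem_symm h hg)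
  apply pvKey_inj
  apply le_antisymm
  · exact pvCanonN_min g _ (hsub2 _ (pvCanonN_mem t))
  · exact pvCanonN_min t _ (hsub1 _ (pvCanonN_mem g))

lemma pvOrb_of_canon_eq {t g : PvShape} (ht : pvStdP t) (hgs : pvStdP g)
    (h : pvCanonN g = pvCanonN t) : g ∈ pvOrb t := by
  have h1 : g ∈ pvOrb (pvCanonN g) := pvOrb_mem_symm hgs (pvCanonN_mem g)
  rw [h] at h1
  exact pvOrb_subset ht (pvCanonN_mem t) g h1

-- ---------- bounds ----------
def pvBndC (n : Int) (p : PvCell) : Prop := 0 ≤ p.1 ∧ p.1 < n ∧ 0 ≤ p.2 ∧ p.2 < n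

def pvBndS (n : Int) (s : PvShape) : Prop := ∀ p ∈ s, pvBndC n p

lemma pvNormB_window {n a b : Int} {s : PvShape} (hne : s ≠ [])
    (hw : ∀ p ∈ s, a ≤ p.1 ∧ p.1 < a + n ∧ b ≤ p.2 ∧ p.2 < b + n) :
    pvBndS n (pvNormB s) := by
  cases s with
  | nil => exact absurd rfl hne
  | cons c r =>
    have hx := pvMinFst_spec c r
    have hy := pvMinSnd_spec c r
    rw [pvNormB_spec (c :: r) _ _ hx hy]
    intro p hp
    have hp2 := (pvSortCells_perm _).mem_iff.mp hp
    rcases List.mem_map.mp hp2 with ⟨q, hq, rfl⟩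
    rcases List.mem_map.mp hx.1 with ⟨w1, hw1, hw1e⟩
    rcases List.mem_map.mp hy.1 with ⟨w2, hw2, hw2e⟩
    have hq1 := hx.2 q.1 (List.mem_map.mpr ⟨q, hq, rfl⟩)
    have hq2 := hy.2 q.2 (List.mem_map.mpr ⟨q, hq, rfl⟩)
    have hbq := hw q hq
    have hbw1 := hw w1 hw1
    have hbw2 := hw w2 hw2
    refine ⟨by dsimp; omega, by dsimp; omega, by dsimp; omega, by dsimp; omega⟩

lemma pvBnd_norm {n : Int} {s : PvShape} (h : pvBndS n s) (hne : s ≠ []) :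
    pvBndS n (pvNormB s) := by
  apply pvNormB_window (a := 0) (b := 0) hne
  intro p hp
  have := h p hp
  unfold pvBndC at this
  omega

lemma pvBnd_R {n : Int} {s : PvShape} (h : pvBndS n s) (hne : s ≠ []) :
    pvBndS n (pvR s) := by
  apply pvNormB_window (a := 0) (b := 1 - n) (pvMap_ne_nil pvRotB hne)
  intro p hp
  rcases List.mem_map.mp hp with ⟨q, hq, rfl⟩
  have := h q hq
  unfold pvBndC at this
  simp only [pvRotB]
  omega

-- ---------- A's standard/rotate agree with B's normalize/pvR on grid-bounded shapes ----------
lemma pvIsMin_drop_head {m a : Int} {l : List Int} (h : pvIsMin m (a :: l))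
    (hle : ∀ x ∈ l, x ≤ a) (hne : l ≠ []) : pvIsMin m l := by
  constructor
  · rcases List.mem_cons.mp h.1 with rfl | hm
    · rcases List.exists_mem_of_ne_nil l hne with ⟨x0, hx0⟩
      have h1 := h.2 x0 (List.mem_cons_of_mem _ hx0)
      have h2 := hle x0 hx0
      have : x0 = m := le_antisymm h2 h1
      rwa [← this]
    · exact hm
  · exact fun x hx => h.2 x (List.mem_cons_of_mem _ hx)

lemma pvStdA_eq {n : Int} {s : PvShape} (hne : s ≠ [])
    (hb : ∀ p ∈ s, p.1 ≤ n ∧ p.2 ≤ n) : pvStdA n s = pvNormB s := by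
  unfold pvStdA
  rw [PySem.List.foldl_prod_mk (f := fun m (c : PvCell) => min m c.1)
    (g := fun m (c : PvCell) => min m c.2)]
  have hmapne : s.map (·.1) ≠ [] := by simpa using hne
  have hmapne2 : s.map (·.2) ≠ [] := by simpa using hne
  have hx : pvIsMin (s.foldl (fun m c => min m c.1) n) (s.map (·.1)) := by
    have h1 : s.foldl (fun m c => min m c.1) n = (s.map (·.1)).foldl min n := by
      rw [List.foldl_map]
    rw [h1]
    apply pvIsMin_drop_head (pvFoldlMin_spec _ n) _ hmapne
    intro x hx
    rcases List.mem_map.mp hx with ⟨q, hq, rfl⟩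
    exact (hb q hq).1
  have hy : pvIsMin (s.foldl (fun m c => min m c.2) n) (s.map (·.2)) := by
    have h1 : s.foldl (fun m c => min m c.2) n = (s.map (·.2)).foldl min n := by
      rw [List.foldl_map]
    rw [h1]
    apply pvIsMin_drop_head (pvFoldlMin_spec _ n) _ hmapne2
    intro x hx
    rcases List.mem_map.mp hx with ⟨q, hq, rfl⟩
    exact (hb q hq).2
  rw [pvNormB_spec s _ _ hx hy]

lemma pvRotateA_eq_R {n : Int} {s : PvShape} (hne : s ≠ []) (hb : pvBndS n s) :
    pvRotateA n s = pvR s := by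
  unfold pvRotateA
  rw [pvStdA_eq (pvMap_ne_nil _ hne) ?hb]
  case hb =>
    intro p hp
    rcases List.mem_map.mp hp with ⟨q, hq, rfl⟩
    have := hb q hq
    unfold pvBndC at this
    dsimp
    omega
  have : s.map (fun c : PvCell => (c.2, n - 1 - c.1))
      = (s.map pvRotB).map (fun p => (p.1 + 0, p.2 + (n - 1))) := by
    rw [List.map_map]
    apply List.map_congr_left
    intro p _
    simp only [Function.comp, pvRotB, Prod.mk.injEq]
    omega
  rw [this, pvNormB_translate]
  rfl

lemma pvTryRotA_iff {n : Int} {g t : PvShape} (ht : pvStdP t) (hb : pvBndS n t) :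
    pvTryRotA n g t 4 = true ↔ g ∈ pvOrb t := by
  have e1 : pvRotateA n t = pvR t := pvRotateA_eq_R ht.1 hb
  have std1 : pvStdP (pvR t) := pvStd_R ht
  have bnd1 : pvBndS n (pvR t) := pvBnd_R hb ht.1
  have e2 : pvRotateA n (pvR t) = pvR (pvR t) := pvRotateA_eq_R std1.1 bnd1
  have std2 : pvStdP (pvR (pvR t)) := pvStd_R std1
  have bnd2 : pvBndS n (pvR (pvR t)) := pvBnd_R bnd1 std1.1
  have e3 : pvRotateA n (pvR (pvR t)) = pvR (pvR (pvR t)) := pvRotateA_eq_R std2.1 bnd2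
  show (if g = t then true else pvTryRotA n g (pvRotateA n t) 3) = true ↔ _
  rw [e1]
  show (if g = t then true else if g = pvR t then true
    else pvTryRotA n g (pvRotateA n (pvR t)) 2) = true ↔ _
  rw [e2]
  show (if g = t then true else if g = pvR t then true else if g = pvR (pvR t) then true
    else pvTryRotA n g (pvRotateA n (pvR (pvR t))) 1) = true ↔ _
  rw [e3]
  show (if g = t then true else if g = pvR t then true else if g = pvR (pvR t) then true
    else if g = pvR (pvR (pvR t)) then true else false) = true ↔ _
  split_ifs with h1 h2 h3 h4 <;> simp [pvOrb, *]

-- ---------- generic fold helpers ----------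
lemma pvFoldl_rel {α σ₁ σ₂ : Type} (R : σ₁ → σ₂ → Prop) (f : σ₁ → α → σ₁) (g : σ₂ → α → σ₂) :
    ∀ (l : List α), (∀ s₁ s₂ x, x ∈ l → R s₁ s₂ → R (f s₁ x) (g s₂ x)) →
      ∀ s₁ s₂, R s₁ s₂ → R (l.foldl f s₁) (l.foldl g s₂) := by
  intro l
  induction l with
  | nil => intro _ s₁ s₂ h; exact h
  | cons x l ih =>
    intro hstep s₁ s₂ h
    rw [List.foldl_cons, List.foldl_cons]
    exact ih (fun a b y hy => hstep a b y (List.mem_cons_of_mem _ hy)) _ _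
      (hstep s₁ s₂ x (List.mem_cons.mpr (Or.inl rfl)) h)

lemma pvFoldl_preserve {α σ : Type} (P : σ → Prop) (f : σ → α → σ) :
    ∀ (l : List α), (∀ s x, x ∈ l → P s → P (f s x)) → ∀ s, P s → P (l.foldl f s) := by
  intro l
  induction l with
  | nil => intro _ s hs; exact hs
  | cons x l ih =>
    intro h s hs
    rw [List.foldl_cons]
    exact ih (fun s' x' hx' => h s' x' (List.mem_cons_of_mem _ hx'))
      (f s x) (h s x (List.mem_cons.mpr (Or.inl rfl)) hs)

lemma pvFoldl_split {α σ₁ σ₂ : Type} (f : σ₁ → α → σ₁) (g : σ₂ → α → σ₂) :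
    ∀ (l : List α) (s : σ₁ × σ₂),
      l.foldl (fun st x => (f st.1 x, g st.2 x)) s = (l.foldl f s.1, l.foldl g s.2) := by
  intro l
  induction l with
  | nil => intro s; rfl
  | cons x l ih => intro s; rw [List.foldl_cons, ih, List.foldl_cons, List.foldl_cons]

-- ---------- visited matrix ↔ seen set ----------
def pvDims (nN : Nat) (v : List (List Bool)) : Prop :=
  v.length = nN ∧ ∀ r ∈ v, r.length = nN

def pvVisEq (nN : Nat) (v : List (List Bool)) (s : PvSeen) : Prop :=
  ∀ p : PvCell, pvBndC (nN : Int) p → (pvGetV v p.1 p.2 = true ↔ p ∈ s)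

lemma pvSetV_dims {nN : Nat} {v : List (List Bool)} (hd : pvDims nN v) {x y : Int}
    (hb : pvBndC (nN : Int) (x, y)) : pvDims nN (pvSetV v x y) := by
  obtain ⟨hx, hx2, hy, hy2⟩ := hb
  unfold pvSetV
  rw [PySem.List.pySetD_of_nonneg v _ hx]
  refine ⟨by rw [List.length_set]; exact hd.1, ?_⟩
  intro r hr
  rcases List.mem_or_eq_of_mem_set hr with hm | he
  · exact hd.2 r hm
  · subst he
    rw [PySem.List.pySetD_of_nonneg _ _ hy, List.length_set]
    have hxl : x < (v.length : Int) := by rw [hd.1]; exact_mod_cast hx2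
    rw [PySem.List.pyGetD_eq_getElem v [] hx hxl]
    exact hd.2 _ (List.getElem_mem _)

lemma pvGetV_pvSetV {nN : Nat} {v : List (List Bool)} (hd : pvDims nN v) {x y a b : Int}
    (hx : 0 ≤ x) (hx2 : x < (nN : Int)) (hy : 0 ≤ y) (_hy2 : y < (nN : Int))
    (ha : 0 ≤ a) (ha2 : a < (nN : Int)) (hb : 0 ≤ b) (hb2 : b < (nN : Int)) :
    pvGetV (pvSetV v x y) a b = (if a = x ∧ b = y then true else pvGetV v a b) := by
  have hxl : x < (v.length : Int) := by rw [hd.1]; exact_mod_cast hx2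
  have hal : a < (v.length : Int) := by rw [hd.1]; exact_mod_cast ha2
  have hrow : PySem.List.pyGetD v x [] = v[x.toNat]'(by omega) :=
    PySem.List.pyGetD_eq_getElem v [] hx hxl
  have hrlen : (v[x.toNat]'(by omega)).length = nN := hd.2 _ (List.getElem_mem _)
  unfold pvGetV pvSetV
  rw [PySem.List.pySetD_of_nonneg v _ hx, hrow,
    PySem.List.pyGetD_eq_getElem _ [] ha (by rw [List.length_set]; exact hal),
    List.getElem_set]
  by_cases hax : x.toNat = a.toNat
  · have hax' : a = x := by omega
    rw [if_pos hax]
    rw [PySem.List.pySetD_of_nonneg _ _ hy,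
      PySem.List.pyGetD_eq_getElem _ false hb
        (by rw [List.length_set, hrlen]; exact_mod_cast hb2),
      List.getElem_set]
    by_cases hby : y.toNat = b.toNat
    · have hby' : b = y := by omega
      rw [if_pos hby, if_pos ⟨hax', hby'⟩]
    · have hne : ¬ (a = x ∧ b = y) := by intro hc; exact hby (by omega)
      rw [if_neg hby, if_neg hne]
      show _ = PySem.List.pyGetD (PySem.List.pyGetD v a []) b false
      rw [PySem.List.pyGetD_eq_getElem v [] ha hal]
      simp only [show a.toNat = x.toNat from by omega]
      rw [PySem.List.pyGetD_eq_getElem _ false hb (by rw [hrlen]; exact_mod_cast hb2)]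
  · have hne : ¬ (a = x ∧ b = y) := by intro hc; exact hax (by omega)
    rw [if_neg hax, if_neg hne]
    show _ = PySem.List.pyGetD (PySem.List.pyGetD v a []) b false
    rw [PySem.List.pyGetD_eq_getElem v [] ha hal]

lemma pvVisEq_set {nN : Nat} {v : List (List Bool)} {s : PvSeen} (h : pvVisEq nN v s)
    (hd : pvDims nN v) {x y : Int} (hc : pvBndC (nN : Int) (x, y)) :
    pvVisEq nN (pvSetV v x y) ((x, y) :: s) := by
  intro p hp
  rw [pvGetV_pvSetV hd hc.1 hc.2.1 hc.2.2.1 hc.2.2.2 hp.1 hp.2.1 hp.2.2.1 hp.2.2.2]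
  by_cases he : p = (x, y)
  · subst he
    simp
  · have hne : ¬ (p.1 = x ∧ p.2 = y) := by
      intro hcc
      exact he (Prod.ext hcc.1 hcc.2)
    rw [if_neg hne, h p hp]
    constructor
    · exact fun hm => List.mem_cons_of_mem _ hm
    · intro hm
      rcases List.mem_cons.mp hm with rfl | hm
      · exact absurd rfl he
      · exact hm

lemma pvVisEq_init (nN : Nat) :
    pvVisEq nN (List.replicate nN (List.replicate nN false)) [] := by
  intro p hp
  obtain ⟨h1, h2, h3, h4⟩ := hp
  have h2' : p.1 < ((List.replicate nN (List.replicate nN false) : List (List Bool)).length : Int) := by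
    rw [List.length_replicate]; exact h2
  unfold pvGetV
  rw [PySem.List.pyGetD_eq_getElem _ [] h1 h2', List.getElem_replicate,
    PySem.List.pyGetD_eq_getElem _ false h3 (by rw [List.length_replicate]; exact h4),
    List.getElem_replicate]
  simp

lemma pvDims_init (nN : Nat) : pvDims nN (List.replicate nN (List.replicate nN false)) := by
  constructor
  · exact List.length_replicate
  · intro r hr
    rw [List.eq_of_mem_replicate hr]
    exact List.length_replicate

-- ---------- A's bfs lockstep with B's growing-component loop ----------
def pvFloodRel (nN k : Nat) (sa : PvShape × PvShape × List (List Bool))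
    (sb : PvShape × PvSeen) : Prop :=
  sa.1 = sb.1.drop k ∧ sa.2.1 = sb.1 ∧ pvVisEq nN sa.2.2 sb.2 ∧ pvDims nN sa.2.2 ∧
    k ≤ sb.1.length

set_option maxHeartbeats 2000000 in
lemma pvVisit_rel {nN : Nat} (board : List (List Int)) (cp : Int) (x y : Int) (k : Nat)
    (sa : PvShape × PvShape × List (List Bool)) (sb : PvShape × PvSeen) (d : Int × Int)
    (h : pvFloodRel nN k sa sb) :
    pvFloodRel nN k (pvBfsStepA (nN : Int) board cp x y sa d)
      (pvVisit (nN : Int) board cp sb (x + d.1, y + d.2)) := by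
  obtain ⟨h1, h2, h3, h4, h5⟩ := h
  unfold pvBfsStepA pvVisit
  by_cases hg : 0 > x + d.1 ∨ x + d.1 ≥ (nN : Int) ∨ 0 > y + d.2 ∨ y + d.2 ≥ (nN : Int)
  · rw [if_pos hg, if_neg (by dsimp; intro hc; rcases hc with ⟨a1, a2, a3, a4, _⟩; omega)]
    exact ⟨h1, h2, h3, h4, h5⟩
  · have hb : pvBndC (nN : Int) (x + d.1, y + d.2) := by
      unfold pvBndC; dsimp; omega
    rw [if_neg hg]
    have hmem : pvGetV sa.2.2 (x + d.1) (y + d.2) = true ↔ (x + d.1, y + d.2) ∈ sb.2 :=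
      h3 _ hb
    have hcont : sb.2.contains (x + d.1, y + d.2) = true ↔ (x + d.1, y + d.2) ∈ sb.2 :=
      List.contains_iff_mem
    by_cases hc : ¬ pvGetV sa.2.2 (x + d.1) (y + d.2) = true ∧
        pvGetB board (x + d.1) (y + d.2) = cp
    · rw [if_pos hc, if_pos (by
        refine ⟨by dsimp; omega, by dsimp; omega, by dsimp; omega, by dsimp; omega, ?_, hc.2⟩
        dsimp only
        intro hcc
        exact hc.1 (hmem.mpr (hcont.mp hcc)))]
      refine ⟨?_, ?_, ?_, ?_, ?_⟩
      · show sa.1 ++ _ = (sb.1 ++ _).drop k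
        rw [h1, List.drop_append_of_le_length h5]
      · show sa.2.1 ++ _ = sb.1 ++ _
        rw [h2]
      · exact pvVisEq_set h3 h4 hb
      · exact pvSetV_dims h4 hb
      · show k ≤ (sb.1 ++ _).length
        rw [List.length_append]
        omega
    · rw [if_neg hc, if_neg (by
        dsimp only
        intro hcc
        exact hc ⟨fun hv => hcc.2.2.2.2.1 (hcont.mpr (hmem.mp hv)), hcc.2.2.2.2.2⟩)]
      exact ⟨h1, h2, h3, h4, h5⟩

lemma pvNbrs_eq_map (x y : Int) :
    pvNbrs (x, y) = pvDirsA.map (fun d => (x + d.1, y + d.2)) := by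
  simp [pvNbrs, pvDirsA]
  omega

set_option maxHeartbeats 2000000 in
lemma pvGrow_rel {nN : Nat} (board : List (List Int)) (cp : Int) :
    ∀ (fuel : Nat) (comp : PvShape) (k : Nat) (seen : PvSeen) (visA : List (List Bool)),
      pvVisEq nN visA seen → pvDims nN visA → k ≤ comp.length →
      (pvBfsLoopA (nN : Int) board cp fuel (comp.drop k) comp visA).1
          = (pvGrow (nN : Int) board cp fuel comp k seen).1 ∧
        pvVisEq nN (pvBfsLoopA (nN : Int) board cp fuel (comp.drop k) comp visA).2
          (pvGrow (nN : Int) board cp fuel comp k seen).2 ∧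
        pvDims nN (pvBfsLoopA (nN : Int) board cp fuel (comp.drop k) comp visA).2 := by
  intro fuel
  induction fuel with
  | zero =>
    intro comp k seen visA hv hd hk
    exact ⟨rfl, hv, hd⟩
  | succ fuel ih =>
    intro comp k seen visA hv hd hk
    cases hdrop : comp.drop k with
    | nil =>
      rw [pvGrow, hdrop]
      exact ⟨rfl, hv, hd⟩
    | cons c rest =>
      rcases hc : c with ⟨x, y⟩
      have hk' : k < comp.length := by
        by_contra hcon
        rw [List.drop_eq_nil_of_le (by omega)] at hdrop
        exact nomatch hdrop
      have hrest : rest = comp.drop (k + 1) := by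
        have := List.tail_drop (l := comp) (i := k)
        rw [hdrop] at this
        simpa using this
      have hinit : pvFloodRel nN (k + 1) (rest, comp, visA) (comp, seen) :=
        ⟨hrest, rfl, hv, hd, by simpa using hk'⟩
      have hfold := pvFoldl_rel (pvFloodRel nN (k + 1))
        (pvBfsStepA (nN : Int) board cp x y)
        (fun s d => pvVisit (nN : Int) board cp s (x + d.1, y + d.2)) pvDirsA
        (fun s₁ s₂ d _ hr => pvVisit_rel board cp x y (k + 1) s₁ s₂ d hr)
        (rest, comp, visA) (comp, seen) hinit
      have hBfold : (pvNbrs (x, y)).foldl (pvVisit (nN : Int) board cp) (comp, seen)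
          = pvDirsA.foldl (fun s d => pvVisit (nN : Int) board cp s (x + d.1, y + d.2))
              (comp, seen) := by
        rw [pvNbrs_eq_map, List.foldl_map]
      obtain ⟨f1, f2, f3, f4, f5⟩ := hfold
      rw [pvGrow, hdrop, hc]
      dsimp only
      rw [hBfold]
      rw [show pvBfsLoopA (nN : Int) board cp (fuel + 1) ((x, y) :: rest) comp visA
          = pvBfsLoopA (nN : Int) board cp fuel
              (pvDirsA.foldl (pvBfsStepA (nN : Int) board cp x y) (rest, comp, visA)).1
              (pvDirsA.foldl (pvBfsStepA (nN : Int) board cp x y) (rest, comp, visA)).2.1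
              (pvDirsA.foldl (pvBfsStepA (nN : Int) board cp x y) (rest, comp, visA)).2.2
        from rfl]
      set stA := pvDirsA.foldl (pvBfsStepA (nN : Int) board cp x y) (rest, comp, visA) with hstA
      set stB := pvDirsA.foldl (fun s d => pvVisit (nN : Int) board cp s (x + d.1, y + d.2))
        (comp, seen) with hstB
      rw [f1, f2]
      exact ih stB.1 (k + 1) stB.2 stA.2.2 f3 f4 f5

-- ---------- the grid scans agree: components arrive sorted on A's side ----------
def pvScanRel (nN : Nat) (sa : List PvShape × List (List Bool))
    (sb : List PvShape × PvSeen) : Prop :=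
  sa.1 = sb.1.map pvSortCells ∧ pvVisEq nN sa.2 sb.2 ∧ pvDims nN sa.2

set_option maxHeartbeats 2000000 in
lemma pvScanCell_rel {nN : Nat} (fuel : Nat) (board : List (List Int)) (cp : Int)
    {i j : Int} (hi : 0 ≤ i ∧ i < (nN : Int)) (hj : 0 ≤ j ∧ j < (nN : Int))
    (sa : List PvShape × List (List Bool)) (sb : List PvShape × PvSeen)
    (h : pvScanRel nN sa sb) :
    pvScanRel nN (pvScanStepA (nN : Int) fuel board cp sa i j)
      (pvScanCell (nN : Int) fuel board cp i sb (j, pvGetB board i j)) := by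
  obtain ⟨h1, h2, h3⟩ := h
  have hb : pvBndC (nN : Int) (i, j) := ⟨hi.1, hi.2, hj.1, hj.2⟩
  have hmem : pvGetV sa.2 i j = true ↔ (i, j) ∈ sb.2 := h2 _ hb
  have hcont : sb.2.contains (i, j) = true ↔ (i, j) ∈ sb.2 := List.contains_iff_mem
  unfold pvScanStepA pvScanCell
  by_cases hg : pvGetB board i j = cp ∧ ¬ pvGetV sa.2 i j = true
  · rw [if_pos hg, if_pos (by
      refine ⟨hg.1, ?_⟩
      dsimp only
      intro hcc
      exact hg.2 (hmem.mpr (hcont.mp hcc)))]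
    have hgrow := pvGrow_rel board cp fuel [(i, j)] 0 ((i, j) :: sb.2)
      (pvSetV sa.2 i j) (pvVisEq_set h2 h3 hb) (pvSetV_dims h3 hb) (by simp)
    rw [List.drop_zero] at hgrow
    obtain ⟨g1, g2, g3⟩ := hgrow
    refine ⟨?_, g2, g3⟩
    show sa.1 ++ [pvSortCells _] = (sb.1 ++ [_]).map pvSortCells
    rw [List.map_append, h1, g1]
    rfl
  · rw [if_neg hg, if_neg (by
      dsimp only
      intro hcc
      exact hg ⟨hcc.1, fun hv => hcc.2 (hcont.mpr (hmem.mp hv))⟩)]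
    exact ⟨h1, h2, h3⟩

set_option maxHeartbeats 2000000 in
lemma pvScan_rel (nN : Nat) (fuel : Nat) (board : List (List Int)) (cp : Int)
    (hlen : nN ≤ board.length) (hrows : ∀ r ∈ board.take nN, nN ≤ r.length) :
    pvScanRel nN
      ((PySem.List.pyRange 0 (nN : Int) 1).foldl (fun s i =>
        (PySem.List.pyRange 0 (nN : Int) 1).foldl
          (fun s j => pvScanStepA (nN : Int) fuel board cp s i j) s)
        ([], List.replicate nN (List.replicate nN false)))
      ((PySem.List.enumerate (board.take nN) 0).foldl (fun st ir =>
        (PySem.List.enumerate (ir.2.take nN) 0).foldl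
          (pvScanCell (nN : Int) fuel board cp ir.1) st) ([], [])) := by
  have hlt : (board.take nN).length = nN := by
    rw [List.length_take]
    omega
  have henum : PySem.List.enumerate (board.take nN) 0
      = (PySem.List.pyRange 0 (nN : Int) 1).map
          (fun i => (i, PySem.List.pyGetD (board.take nN) i [])) := by
    rw [PySem.List.enumerate_eq_map_pyRange (board.take nN) [], PySem.List.len_eq, hlt]
  rw [henum, List.foldl_map]
  refine pvFoldl_rel (pvScanRel nN) _ _ (PySem.List.pyRange 0 (nN : Int) 1) ?step
    _ _ ?init
  case init => exact ⟨rfl, pvVisEq_init nN, pvDims_init nN⟩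
  intro sa sb i hi hrel
  have hib : 0 ≤ i ∧ i < (nN : Int) := by
    have := PySem.List.mem_pyRange_one.mp hi
    exact ⟨this.1, this.2⟩
  -- the enumerated row is board[i]
  have hrow : PySem.List.pyGetD (board.take nN) i []
      = board[i.toNat]'(by omega) := by
    rw [PySem.List.pyGetD_eq_getElem (board.take nN) [] hib.1
        (by rw [hlt]; exact_mod_cast hib.2)]
    exact List.getElem_take
  have hrl : nN ≤ (board[i.toNat]'(by omega)).length := by
    apply hrows
    rw [← hrow]
    have : i < ((board.take nN).length : Int) := by rw [hlt]; exact_mod_cast hib.2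
    refine PySem.List.pyGetD_mem _ [] ?_
    unfold PySem.Raise.InRange
    rw [hlt]
    omega
  dsimp only
  have hrlt : ((board[i.toNat]'(by omega)).take nN).length = nN := by
    rw [List.length_take]
    omega
  have henum2 : PySem.List.enumerate ((PySem.List.pyGetD (board.take nN) i []).take nN) 0
      = (PySem.List.pyRange 0 (nN : Int) 1).map
          (fun j => (j, PySem.List.pyGetD ((board[i.toNat]'(by omega)).take nN) j 0)) := by
    rw [hrow, PySem.List.enumerate_eq_map_pyRange _ (0 : Int), PySem.List.len_eq, hrlt]
  rw [henum2, List.foldl_map]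
  apply pvFoldl_rel (pvScanRel nN) _ _ (PySem.List.pyRange 0 (nN : Int) 1) ?istep _ _ hrel
  intro sa' sb' j hj hrel'
  have hjb : 0 ≤ j ∧ j < (nN : Int) := by
    have := PySem.List.mem_pyRange_one.mp hj
    exact ⟨this.1, this.2⟩
  have hval : PySem.List.pyGetD ((board[i.toNat]'(by omega)).take nN) j 0
      = pvGetB board i j := by
    rw [PySem.List.pyGetD_eq_getElem _ 0 hjb.1 (by rw [hrlt]; exact_mod_cast hjb.2),
      List.getElem_take]
    unfold pvGetB
    rw [PySem.List.pyGetD_eq_getElem board [] hib.1 (by exact_mod_cast (by omega : i < (board.length : Int))),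
      PySem.List.pyGetD_eq_getElem _ 0 hjb.1 (by exact_mod_cast (by omega : j < ((board[i.toNat]'(by omega)).length : Int)))]
  rw [hval]
  exact pvScanCell_rel fuel board cp hib hjb sa' sb' hrel'

-- ---------- every component B finds is nonempty and inside the n×n grid ----------
lemma pvVisit_keep {n : Int} {board : List (List Int)} {v : Int}
    {st : PvShape × PvSeen} {c : PvCell} (h : st.1 ≠ [] ∧ pvBndS n st.1) :
    (pvVisit n board v st c).1 ≠ [] ∧ pvBndS n (pvVisit n board v st c).1 := by
  unfold pvVisit
  split_ifs with hc
  · refine ⟨by simp, ?_⟩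
    intro q hq
    rcases List.mem_append.mp hq with hq | hq
    · exact h.2 q hq
    · rcases List.mem_singleton.mp hq with rfl
      exact ⟨hc.1, hc.2.1, hc.2.2.1, hc.2.2.2.1⟩
  · exact h

lemma pvGrow_keep {n : Int} {board : List (List Int)} {v : Int} :
    ∀ (fuel : Nat) (comp : PvShape) (k : Nat) (seen : PvSeen),
      comp ≠ [] → pvBndS n comp →
      (pvGrow n board v fuel comp k seen).1 ≠ [] ∧
        pvBndS n (pvGrow n board v fuel comp k seen).1 := by
  intro fuel
  induction fuel with
  | zero => intro comp k seen h1 h2; exact ⟨h1, h2⟩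
  | succ fuel ih =>
    intro comp k seen h1 h2
    rw [pvGrow]
    cases hdrop : comp.drop k with
    | nil => exact ⟨h1, h2⟩
    | cons c rest =>
      dsimp only
      have := pvFoldl_preserve (fun (st : PvShape × PvSeen) => st.1 ≠ [] ∧ pvBndS n st.1)
        (pvVisit n board v) (pvNbrs c) (fun s x _ hs => pvVisit_keep hs) (comp, seen) ⟨h1, h2⟩
      exact ih _ (k + 1) _ this.1 this.2

lemma pvComponentsB_props (nN : Nat) (board : List (List Int)) (v : Int) :
    ∀ comp ∈ pvComponentsB nN board v, comp ≠ [] ∧ pvBndS (nN : Int) comp := by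
  unfold pvComponentsB
  apply pvFoldl_preserve
    (fun (st : List PvShape × PvSeen) => ∀ comp ∈ st.1, comp ≠ [] ∧ pvBndS (nN : Int) comp)
    _ _ ?_ _ (by simp)
  intro s ir hir hs
  have hirb : 0 ≤ ir.1 ∧ ir.1 < (nN : Int) := by
    rcases (PySem.List.mem_enumerate_iff _ _ _).mp hir with ⟨k, hk, rfl⟩
    have : k < nN := lt_of_lt_of_le hk (List.length_take_le nN board)
    constructor
    · simp
    · simp
      omega
  apply pvFoldl_preserve
    (fun (st : List PvShape × PvSeen) => ∀ comp ∈ st.1, comp ≠ [] ∧ pvBndS (nN : Int) comp)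
    _ _ ?_ _ hs
  intro s' jv hjv hs'
  have hjvb : 0 ≤ jv.1 ∧ jv.1 < (nN : Int) := by
    rcases (PySem.List.mem_enumerate_iff _ _ _).mp hjv with ⟨k, hk, rfl⟩
    have : k < nN := lt_of_lt_of_le hk (List.length_take_le nN ir.2)
    constructor
    · simp
    · simp
      omega
  unfold pvScanCell
  split_ifs with hc
  · intro comp hcomp
    rcases List.mem_append.mp hcomp with hcomp | hcomp
    · exact hs' comp hcomp
    · rcases List.mem_singleton.mp hcomp with rfl
      apply pvGrow_keep _ _ _ _ (by simp)
      intro p hp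
      rcases List.mem_singleton.mp hp with rfl
      exact ⟨hirb.1, hirb.2, hjvb.1, hjvb.2⟩
  · exact hs'

-- ---------- A's per-component standardization equals B's normalize ----------
lemma pvStdSort_eq {n : Int} {c : PvShape} (hne : c ≠ []) (hb : pvBndS n c) :
    pvStdA n (pvSortCells c) = pvNormB c := by
  have hsne : pvSortCells c ≠ [] := by
    intro hcon
    have := pvSortCells_length c
    rw [hcon] at this
    exact hne (List.eq_nil_of_length_eq_zero this.symm)
  rw [pvStdA_eq hsne ?_, pvNormB_perm (pvSortCells_perm c)]
  intro p hp
  have := hb p ((pvSortCells_perm c).mem_iff.mp hp)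
  unfold pvBndC at this
  omega

-- ---------- the matching phase: A's rotate-and-scan vs B's canonical-form counter ----------
lemma pvMatch_rel (n : Int) :
    ∀ (cs tb : List PvShape) (d : PySem.Dict PvShape Int) (ans : Int),
      (∀ c ∈ cs, c ≠ [] ∧ pvBndS n c) →
      (∀ t ∈ tb, pvStdP t ∧ pvBndS n t) →
      (∀ k, d.getD k 0 = (tb.countP (fun t => pvCanonN t == k) : Int)) →
      ((cs.map pvNormB).foldl (pvMatchStepA n) (ans, tb)).1
        = (cs.foldl (fun (st : Int × PySem.Dict PvShape Int) c =>
            if st.2.getD (pvCanonB c) 0 > 0 then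
              (st.1 + (c.length : Int), st.2.insert (pvCanonB c) (st.2.getD (pvCanonB c) 0 - 1))
            else st) (ans, d)).1 := by
  intro cs
  induction cs with
  | nil => intro tb d ans _ _ _; rfl
  | cons c cs ih =>
    intro tb d ans hcs htb hd
    obtain ⟨hne, hbnd⟩ := hcs c (List.mem_cons.mpr (Or.inl rfl))
    have hcs' : ∀ c' ∈ cs, c' ≠ [] ∧ pvBndS n c' :=
      fun c' hc' => hcs c' (List.mem_cons_of_mem _ hc')
    have hgstd : pvStdP (pvNormB c) := pvStd_norm hne
    have hkey : pvCanonB c = pvCanonN (pvNormB c) := pvCanonB_eq c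
    rw [List.map_cons, List.foldl_cons, List.foldl_cons]
    dsimp only
    by_cases hz : tb.countP (fun t => pvCanonN t == pvCanonN (pvNormB c)) = 0
    · have hall := List.countP_eq_zero.mp hz
      have hmem : pvNormB c ∉ tb := by
        intro hm
        exact hall _ hm (by simp)
      have hfind : tb.find? (fun t => pvTryRotA n (pvNormB c) t 4) = none := by
        rw [List.find?_eq_none]
        intro t ht htry
        have horb := (pvTryRotA_iff (htb t ht).1 (htb t ht).2).mp htry
        exact hall t ht (by simp [pvCanon_eq_of_orb (htb t ht).1 horb])
      have hA : pvMatchStepA n (ans, tb) (pvNormB c) = (ans, tb) := by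
        unfold pvMatchStepA
        rw [if_neg (by simpa using hmem), hfind]
      rw [hA, if_neg (by rw [hkey, hd, hz]; simp)]
      exact ih tb d ans hcs' htb hd
    · have hpos : 0 < tb.countP (fun t => pvCanonN t == pvCanonN (pvNormB c)) := Nat.pos_of_ne_zero hz
      have hcont : ∀ t₀, t₀ ∈ tb → pvCanonN t₀ = pvCanonN (pvNormB c) →
          ((cs.map pvNormB).foldl (pvMatchStepA n)
            (ans + ((pvNormB c).length : Int), tb.erase t₀)).1
          = (cs.foldl (fun (st : Int × PySem.Dict PvShape Int) c =>
              if st.2.getD (pvCanonB c) 0 > 0 then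
                (st.1 + (c.length : Int), st.2.insert (pvCanonB c) (st.2.getD (pvCanonB c) 0 - 1))
              else st) (ans + (c.length : Int),
                d.insert (pvCanonB c) (d.getD (pvCanonB c) 0 - 1))).1 := by
        intro t₀ ht₀ hct₀
        have hlen : ((pvNormB c).length : Int) = (c.length : Int) := by
          rw [pvNormB_length]
        rw [hlen]
        apply ih
        · exact hcs'
        · intro t ht
          exact htb t (List.mem_of_mem_erase ht)
        · intro k'
          have hperm := List.perm_cons_erase ht₀
          have hcntP : ∀ p : PvShape → Bool,
              tb.countP p = (tb.erase t₀).countP p + (if p t₀ then 1 else 0) := by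
            intro p
            rw [hperm.countP_eq p, List.countP_cons]
          by_cases hk : k' = pvCanonB c
          · subst hk
            rw [PySem.Dict.getD_insert_self, hd, hkey]
            have := hcntP (fun t => pvCanonN t == pvCanonN (pvNormB c))
            rw [if_pos (by simp [hct₀])] at this
            have hc1 : (tb.erase t₀).countP (fun t => pvCanonN t == pvCanonN (pvNormB c))
                = tb.countP (fun t => pvCanonN t == pvCanonN (pvNormB c)) - 1 := by omega
            rw [hc1]
            have := hpos
            omega
          · rw [PySem.Dict.getD_insert, if_neg hk, hd]
            have := hcntP (fun t => pvCanonN t == k')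
            rw [if_neg (by
              simp only [hct₀, beq_iff_eq]
              intro hcon
              exact hk (by rw [hkey]; exact hcon.symm))] at this
            rw [this]
            push_cast
            omega
      rw [if_pos (show d.getD (pvCanonB c) 0 > 0 by rw [hkey, hd]; exact_mod_cast hpos)]
      by_cases hmem : pvNormB c ∈ tb
      · have hA : pvMatchStepA n (ans, tb) (pvNormB c)
            = (ans + ((pvNormB c).length : Int), tb.erase (pvNormB c)) := by
          unfold pvMatchStepA
          rw [if_pos (by simpa using hmem)]
        rw [hA]
        exact hcont _ hmem rfl
      · obtain ⟨t₁, ht₁, hpt₁⟩ : ∃ t ∈ tb, (pvCanonN t == pvCanonN (pvNormB c)) = true := by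
          by_contra hcon
          exact hz (List.countP_eq_zero.mpr (fun t ht => by
            simp only [Bool.not_eq_true]
            by_contra hb
            exact hcon ⟨t, ht, by simpa using hb⟩))
        have htry₁ : pvTryRotA n (pvNormB c) t₁ 4 = true := by
          rw [pvTryRotA_iff (htb t₁ ht₁).1 (htb t₁ ht₁).2]
          refine pvOrb_of_canon_eq (htb t₁ ht₁).1 hgstd ?_
          have h := hpt₁
          simp only [beq_iff_eq] at h
          exact h.symm
        have hfind : ∃ t₀, tb.find? (fun t => pvTryRotA n (pvNormB c) t 4) = some t₀ := by
          cases hf : tb.find? (fun t => pvTryRotA n (pvNormB c) t 4) with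
          | none => exact absurd htry₁ (List.find?_eq_none.mp hf t₁ ht₁)
          | some t₀ => exact ⟨t₀, rfl⟩
        obtain ⟨t₀, ht₀⟩ := hfind
        have ht₀mem : t₀ ∈ tb := List.mem_of_find?_eq_some ht₀
        have ht₀try : pvTryRotA n (pvNormB c) t₀ 4 = true := by
          have := List.find?_some ht₀
          simpa using this
        have ht₀c : pvCanonN t₀ = pvCanonN (pvNormB c) :=
          (pvCanon_eq_of_orb (htb t₀ ht₀mem).1
            ((pvTryRotA_iff (htb t₀ ht₀mem).1 (htb t₀ ht₀mem).2).mp ht₀try)).symm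
        have hA : pvMatchStepA n (ans, tb) (pvNormB c)
            = (ans + ((pvNormB c).length : Int), tb.erase t₀) := by
          unfold pvMatchStepA
          rw [if_neg (by simpa using hmem), ht₀]
        rw [hA]
        exact hcont _ ht₀mem ht₀c

-- ---------- the counter B builds counts table components per canonical form ----------
lemma pvCounts_spec (cellsT : List PvShape) (k : PvShape) :
    (cellsT.foldl (fun (d : PySem.Dict PvShape Int) c =>
        d.insert (pvCanonB c) (d.getD (pvCanonB c) 0 + 1)) PySem.Dict.empty).getD k 0
      = ((cellsT.map pvNormB).countP (fun t => pvCanonN t == k) : Int) := by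
  have h1 : cellsT.foldl (fun (d : PySem.Dict PvShape Int) c =>
      d.insert (pvCanonB c) (d.getD (pvCanonB c) 0 + 1)) PySem.Dict.empty
      = (cellsT.map pvCanonB).foldl (fun (d : PySem.Dict PvShape Int) x =>
          d.insert x (d.getD x 0 + 1)) PySem.Dict.empty := by
    rw [List.foldl_map]
  rw [h1, PySem.Dict.getD_foldl_insert_add_one, PySem.Dict.getD_empty]
  rw [List.count_eq_countP, List.countP_map, List.countP_map]
  have : ((fun x => x == k) ∘ pvCanonB) = ((fun t => pvCanonN t == k) ∘ pvNormB) := by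
    funext c
    simp [Function.comp, pvCanonB_eq]
  rw [this]
  omega

-- ---------- top-level assembly ----------
lemma pvSolution_eq (game_board table : List (List Int))
    (hpre : Pre_solution game_board table) :
    solution game_board table = solution_alt game_board table := by
  obtain ⟨hg, htl, htr⟩ := hpre
  set nN := game_board.length with hnN
  set n : Int := (nN : Int) with hn
  set fuel := nN * nN + 1 with hfuel
  set vis0 := List.replicate nN (List.replicate nN false) with hvis0
  set rng := PySem.List.pyRange 0 n 1 with hrng
  -- the interleaved scan is a product of two independent scans
  have hsplit : rng.foldl (fun st i =>
      rng.foldl (fun (st : (List PvShape × List (List Bool)) × (List PvShape × List (List Bool))) j =>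
        (pvScanStepA n fuel game_board 0 st.1 i j, pvScanStepA n fuel table 1 st.2 i j)) st)
      (([], vis0), ([], vis0))
      = (rng.foldl (fun s i => rng.foldl (fun s j => pvScanStepA n fuel game_board 0 s i j) s) ([], vis0),
         rng.foldl (fun s i => rng.foldl (fun s j => pvScanStepA n fuel table 1 s i j) s) ([], vis0)) := by
    rw [PySem.List.foldl_congr_mem rng _
      (fun (st : (List PvShape × List (List Bool)) × (List PvShape × List (List Bool))) i =>
        (rng.foldl (fun s j => pvScanStepA n fuel game_board 0 s i j) st.1,
         rng.foldl (fun s j => pvScanStepA n fuel table 1 s i j) st.2)) _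
      (fun st i _ => pvFoldl_split _ _ rng st)]
    exact pvFoldl_split
      (f := fun s i => rng.foldl (fun s j => pvScanStepA n fuel game_board 0 s i j) s)
      (g := fun s i => rng.foldl (fun s j => pvScanStepA n fuel table 1 s i j) s)
      rng (([], vis0), ([], vis0))
  have hgrows : ∀ r ∈ game_board.take nN, nN ≤ r.length := by
    intro r hr
    exact hg r (List.mem_of_mem_take hr)
  have hrelG := pvScan_rel nN fuel game_board 0 (by omega) hgrows
  have hrelT := pvScan_rel nN fuel table 1 htl htr
  show ((((rng.foldl (fun st i =>
      rng.foldl (fun (st : (List PvShape × List (List Bool)) × (List PvShape × List (List Bool))) j =>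
        (pvScanStepA n fuel game_board 0 st.1 i j, pvScanStepA n fuel table 1 st.2 i j)) st)
      (([], vis0), ([], vis0))).1.1.map (pvStdA n)).foldl (pvMatchStepA n)
        (0, ((rng.foldl (fun st i =>
          rng.foldl (fun (st : (List PvShape × List (List Bool)) × (List PvShape × List (List Bool))) j =>
            (pvScanStepA n fuel game_board 0 st.1 i j, pvScanStepA n fuel table 1 st.2 i j)) st)
          (([], vis0), ([], vis0))).2.1.map (pvStdA n)))).1 : Int)
    = (((pvComponentsB nN game_board 0).foldl (fun (st : Int × PySem.Dict PvShape Int) c =>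
        if st.2.getD (pvCanonB c) 0 > 0 then
          (st.1 + (c.length : Int), st.2.insert (pvCanonB c) (st.2.getD (pvCanonB c) 0 - 1))
        else st)
        (0, (pvComponentsB nN table 1).foldl (fun (d : PySem.Dict PvShape Int) c =>
          d.insert (pvCanonB c) (d.getD (pvCanonB c) 0 + 1)) PySem.Dict.empty)).1 : Int)
  rw [hsplit]
  dsimp only
  rw [hrelG.1, hrelT.1]
  have eG : ((PySem.List.enumerate (game_board.take nN) 0).foldl (fun st ir =>
      (PySem.List.enumerate (ir.2.take nN) 0).foldl
        (pvScanCell (nN : Int) fuel game_board 0 ir.1) st) ([], [])).1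
      = pvComponentsB nN game_board 0 := rfl
  have eT : ((PySem.List.enumerate (table.take nN) 0).foldl (fun st ir =>
      (PySem.List.enumerate (ir.2.take nN) 0).foldl
        (pvScanCell (nN : Int) fuel table 1 ir.1) st) ([], [])).1
      = pvComponentsB nN table 1 := rfl
  rw [eG, eT]
  rw [List.map_map, List.map_map]
  have hmapG : (pvComponentsB nN game_board 0).map (pvStdA n ∘ pvSortCells)
      = (pvComponentsB nN game_board 0).map pvNormB := by
    apply List.map_congr_left
    intro c hc
    obtain ⟨hne, hb⟩ := pvComponentsB_props nN game_board 0 c hc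
    exact pvStdSort_eq hne hb
  have hmapT : (pvComponentsB nN table 1).map (pvStdA n ∘ pvSortCells)
      = (pvComponentsB nN table 1).map pvNormB := by
    apply List.map_congr_left
    intro c hc
    obtain ⟨hne, hb⟩ := pvComponentsB_props nN table 1 c hc
    exact pvStdSort_eq hne hb
  rw [hmapG, hmapT]
  apply pvMatch_rel n (pvComponentsB nN game_board 0) ((pvComponentsB nN table 1).map pvNormB)
  · exact pvComponentsB_props nN game_board 0
  · intro t ht
    rcases List.mem_map.mp ht with ⟨c, hc, rfl⟩
    obtain ⟨hne, hb⟩ := pvComponentsB_props nN table 1 c hc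
    exact ⟨pvStd_norm hne, pvBnd_norm hb hne⟩
  · intro k
    exact pvCounts_spec (pvComponentsB nN table 1) k

-- ===== VERDICT (by name: the statement is the Claim_ definition above) =====
theorem solution_spec : Claim_equal_solution := by
  intro game_board table _ hpre
  exact pvSolution_eq game_board table hpre
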